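-- pv_equiv track=rewrite | github.com/jspsych/eyetracking-models | Models/Models(Python)/Experiments/Failed Experiment Code.py | get_tc_data
-- ===== SOURCE A (Python) =====
-- def is_calibration_data(dict):
--   if dict["phase"] == "calibration":
--     return True
--   else: return False
--
-- def is_test_data(dict):
--   if dict["phase"] == "test":
--     return True
--   else: return False
--
-- def get_tc_data(dict):
--   all_videos_data = []
--   for key, value in dict.items():
--     for per_video_data in value:
--       all_videos_data.append(per_video_data)
--   calibration_data = list(filter(is_calibration_data, all_videos_data))
--   test_data = list(filter(is_test_data, all_videos_data))
--   return calibration_data, test_data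
-- ===== SOURCE B (Python) =====
-- def get_tc_data(dict):
--     calibration_data = []
--     test_data = []
--     for value in dict.values():
--         for entry in value:
--             phase = entry["phase"]
--             if phase == "calibration":
--                 calibration_data.append(entry)
--             elif phase == "test":
--                 test_data.append(entry)
--     return calibration_data, test_data
-- ===== Notes on version B (the rewrite author's own statement) =====
-- stated objective: simpler
-- what changed: One combined flatten-and-partition pass dispatching each entry by its phase into the two result lists, replacing A's intermediate flattened list, two predicate helpers and two filter scans.
import Mathlib
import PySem

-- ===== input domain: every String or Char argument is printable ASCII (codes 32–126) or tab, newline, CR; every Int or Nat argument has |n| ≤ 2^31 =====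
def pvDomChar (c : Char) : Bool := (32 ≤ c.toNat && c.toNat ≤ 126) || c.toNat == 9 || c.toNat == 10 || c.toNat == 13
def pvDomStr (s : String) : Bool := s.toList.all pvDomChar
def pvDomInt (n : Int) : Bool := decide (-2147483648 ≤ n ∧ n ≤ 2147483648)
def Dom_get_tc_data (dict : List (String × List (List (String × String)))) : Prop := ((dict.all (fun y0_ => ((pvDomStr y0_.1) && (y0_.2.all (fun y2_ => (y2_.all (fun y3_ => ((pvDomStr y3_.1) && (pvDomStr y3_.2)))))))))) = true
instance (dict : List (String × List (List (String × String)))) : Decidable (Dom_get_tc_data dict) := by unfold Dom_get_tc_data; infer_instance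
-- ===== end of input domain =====

-- B replaces A's build-flattened-list-then-two-filter-scans with one combined
-- flatten-and-partition pass dispatching each entry on its "phase" value (objective: simpler).

-- entry["phase"] as an Option (none = the KeyError case, excluded by Pre_)
def pvPhase (e : List (String × String)) : Option String := (PySem.Dict.mk e).get? "phase"

-- ===== PORT A =====
def is_calibration_data (d : List (String × String)) : Bool :=
  if pvPhase d == some "calibration" then true else false

def is_test_data (d : List (String × String)) : Bool :=
  if pvPhase d == some "test" then true else false

def get_tc_data (dict : List (String × List (List (String × String)))) : (List (List (String × String))) × (List (List (String × String))) :=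
  let all_videos_data :=
    dict.foldl (fun acc kv => kv.2.foldl (fun a per_video_data => a ++ [per_video_data]) acc) []
  let calibration_data := all_videos_data.filter is_calibration_data
  let test_data := all_videos_data.filter is_test_data
  (calibration_data, test_data)

-- ===== PORT B =====
def get_tc_data_alt (dict : List (String × List (List (String × String)))) : (List (List (String × String))) × (List (List (String × String))) :=
  dict.foldl (fun ct kv =>
    kv.2.foldl (fun ct entry =>
      let phase := pvPhase entry
      if phase == some "calibration" then (ct.1 ++ [entry], ct.2)
      else if phase == some "test" then (ct.1, ct.2 ++ [entry])
      else ct) ct) ([], [])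

-- ===== PRECONDITION & SPEC =====
-- Pre_ excludes exactly the inputs where some entry lacks a "phase" key: there the Python A
-- (and the Python B) raises KeyError instead of returning.
def Pre_get_tc_data (dict : List (String × List (List (String × String)))) : Prop :=
  ∀ kv ∈ dict, ∀ e ∈ kv.2, (pvPhase e).isSome = true
instance (dict : List (String × List (List (String × String)))) : Decidable (Pre_get_tc_data dict) := by unfold Pre_get_tc_data; infer_instance

def pvWitness_get_tc_data : (List (String × List (List (String × String)))) :=
  [("k", [[("phase", "test")], [("phase", "calibration"), ("x", "1")]])]

def Spec_get_tc_data (dict : List (String × List (List (String × String)))) (out : (List (List (String × String))) × (List (List (String × String)))) : Prop := out = get_tc_data_alt dict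
instance (dict : List (String × List (List (String × String)))) (out : (List (List (String × String))) × (List (List (String × String)))) : Decidable (Spec_get_tc_data dict out) := by unfold Spec_get_tc_data; infer_instance

-- ===== CLAIM (what is proved, stated in full; the proofs are below) =====
def Claim_equal_get_tc_data : Prop := ∀ (dict : List (String × List (List (String × String)))), Dom_get_tc_data dict → Pre_get_tc_data dict → Spec_get_tc_data dict (get_tc_data dict)

-- ===== LEMMAS AND PROOFS =====

lemma pv_append_fold (xs acc : List (List (String × String))) :
    xs.foldl (fun a e => a ++ [e]) acc = acc ++ xs := by
  induction xs generalizing acc with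
  | nil => simp
  | cons x xs ih => simp [List.foldl, ih]

lemma pv_flat_fold (l : List (String × List (List (String × String))))
    (acc : List (List (String × String))) :
    l.foldl (fun a kv => kv.2.foldl (fun a e => a ++ [e]) a) acc
      = acc ++ l.flatMap (·.2) := by
  induction l generalizing acc with
  | nil => simp
  | cons kv l ih =>
    rw [List.foldl_cons, pv_append_fold, ih]
    simp

lemma pv_inner_fold (xs : List (List (String × String)))
    (ct : List (List (String × String)) × List (List (String × String))) :
    xs.foldl (fun ct entry =>
      let phase := pvPhase entry
      if phase == some "calibration" then (ct.1 ++ [entry], ct.2)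
      else if phase == some "test" then (ct.1, ct.2 ++ [entry])
      else ct) ct
      = (ct.1 ++ xs.filter is_calibration_data, ct.2 ++ xs.filter is_test_data) := by
  induction xs generalizing ct with
  | nil => simp
  | cons e xs ih =>
    rw [List.foldl_cons, ih]
    by_cases hc : pvPhase e = some "calibration"
    · simp [is_calibration_data, is_test_data, hc]
    · by_cases ht : pvPhase e = some "test"
      · simp [is_calibration_data, is_test_data, ht]
      · simp [is_calibration_data, is_test_data, hc, ht]

lemma pv_outer_fold (l : List (String × List (List (String × String))))
    (ct : List (List (String × String)) × List (List (String × String))) :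
    l.foldl (fun ct kv =>
      kv.2.foldl (fun ct entry =>
        let phase := pvPhase entry
        if phase == some "calibration" then (ct.1 ++ [entry], ct.2)
        else if phase == some "test" then (ct.1, ct.2 ++ [entry])
        else ct) ct) ct
      = (ct.1 ++ (l.flatMap (·.2)).filter is_calibration_data,
         ct.2 ++ (l.flatMap (·.2)).filter is_test_data) := by
  induction l generalizing ct with
  | nil => simp
  | cons kv l ih =>
    rw [List.foldl_cons, ih, pv_inner_fold]
    simp [List.filter_append]

-- ===== VERDICT (by name: the statement is the Claim_ definition above) =====
theorem get_tc_data_spec : Claim_equal_get_tc_data := by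
  intro dict _ _
  unfold Spec_get_tc_data get_tc_data get_tc_data_alt
  rw [pv_flat_fold, pv_outer_fold]
  simp
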